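-- pv_equiv track=rewrite | github.com/TheAIArchitect/Pynections | main/gauntlet.py | clean_up_crunched_keys
-- ===== SOURCE A (Python) =====
-- def clean_up_crunched_keys(lemma_list, crunched_keys):
--     ''' removes duplicate keys from the crunched_keys, and joins the inner key lists (so, a two word key that was split to look like ['the', 'boy'] will be joined to look like "the boy'.
--
--     an example of the input can be found in "recusive_key_cruncher". The output from this function, assuming that input, will be:
--
--     ['the', 'boy', 'went', 'home']
--     ['the', 'boy', 'went home']
--     ['the', 'boy went', 'home']
--     ['the boy', 'went', 'home']
--     ['the boy', 'went home']
--     ['the boy went', 'home']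
--
--     '''
--     cleaned_key_list_list = []
--     for key_list in crunched_keys:
--         key_list.reverse() # the cruncher ('recursive_key_cruncher') produced reversed lists. Now, we reverse the reversal.
--         cleaned_key_list = []
--         used_lemmas = []
--         for key_as_list in key_list:
--             skip_this_key = False
--             for key_token in key_as_list: # Make sure to account for double/ triple occurrences of the same word!
--                 may_be_multiple_occurrences = True
--                 used_lemma = -1
--                 while may_be_multiple_occurrences:
--                     try:
--                         used_lemma = lemma_list.index(key_token, used_lemma+1)
--                         if used_lemma in used_lemmas:
--                             continue # try again
--                         else:
--                             break # everything is alright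
--                     except ValueError:
--                             skip_this_key = True
--                             break
--                 used_lemmas.append(used_lemma)
--             if not skip_this_key:
--                 cleaned_key_list.append(' '.join(key_as_list))
--         cleaned_key_list_list.append(cleaned_key_list)
--     no_duplicates = []
--     for inner_list in cleaned_key_list_list:
--         if inner_list in no_duplicates:
--             continue
--         no_duplicates.append(inner_list)
--     return no_duplicates
-- ===== SOURCE B (Python) =====
-- def clean_up_crunched_keys(lemma_list, crunched_keys):
--     # Multiset/counting view: searching lemma_list for the first unused index of a token
--     # succeeds exactly when the token's running occurrence count within the current
--     # key list has not yet exhausted its multiplicity in lemma_list, so no index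
--     # bookkeeping is needed at all -- only two counters.
--     total = {}
--     for tok in lemma_list:
--         total[tok] = total.get(tok, 0) + 1
--     cleaned_lists = []
--     for key_list in crunched_keys:
--         key_list.reverse()  # undo the cruncher's reversal (in place, as A does)
--         seen = {}
--         cleaned = []
--         for phrase in key_list:
--             keep = True
--             for tok in phrase:
--                 n = seen.get(tok, 0) + 1
--                 seen[tok] = n
--                 if n > total.get(tok, 0):
--                     keep = False
--             if keep:
--                 cleaned.append(' '.join(phrase))
--         cleaned_lists.append(cleaned)
--     out, seen_lists = [], set()
--     for inner in cleaned_lists: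
--         t = tuple(inner)
--         if t not in seen_lists:
--             seen_lists.add(t)
--             out.append(inner)
--     return out
-- ===== Notes on version B (the rewrite author's own statement) =====
-- stated objective: faster
-- what changed: B drops A's index bookkeeping entirely: instead of repeatedly scanning lemma_list with .index and a used-positions list, it precomputes a multiplicity counter of lemma_list and keeps a per-key-list running occurrence counter, keeping a phrase iff no token's running count exceeds its multiplicity (correct because A's search for token t succeeds exactly when fewer than count(t) occurrences of t were consumed so far); the final quadratic list-membership dedup becomes a seen-set dedup.
import Mathlib
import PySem

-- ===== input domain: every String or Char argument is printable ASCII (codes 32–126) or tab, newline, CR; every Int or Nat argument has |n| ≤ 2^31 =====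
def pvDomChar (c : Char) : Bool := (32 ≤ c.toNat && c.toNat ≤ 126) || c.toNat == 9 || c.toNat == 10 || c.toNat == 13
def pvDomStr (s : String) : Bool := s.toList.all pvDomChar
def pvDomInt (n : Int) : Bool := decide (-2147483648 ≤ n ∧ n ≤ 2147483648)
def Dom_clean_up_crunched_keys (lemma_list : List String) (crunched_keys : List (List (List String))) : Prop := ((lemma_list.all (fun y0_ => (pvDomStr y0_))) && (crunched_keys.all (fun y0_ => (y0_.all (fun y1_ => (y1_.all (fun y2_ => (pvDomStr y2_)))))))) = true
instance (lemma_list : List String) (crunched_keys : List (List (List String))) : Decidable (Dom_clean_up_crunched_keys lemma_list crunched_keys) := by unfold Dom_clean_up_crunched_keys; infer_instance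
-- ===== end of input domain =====

-- B replaces A's repeated lemma_list.index searches over a used-positions list by pure counting: a
-- phrase survives iff no token's running occurrence count within its key list exceeds the token's
-- multiplicity in lemma_list; the final list-membership dedup becomes a seen-set dedup (objective: faster).
-- A reverses each inner key_list in place; equivalence here is about the RETURN value (B performs the same mutation in Python).

-- ===== PORT A =====
-- Python list.index(tok, start): first index ≥ start holding tok (hand port; exact here because
-- start = used_lemma + 1 is always ≥ 0 in A — used_lemma is -1 or a previously found index).
def pvIndexFromAux (tok : String) : List String → Int → Option Int
  | [], _ => none
  | t :: rest, i => if t == tok then some i else pvIndexFromAux tok rest (i + 1)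

def pvIndexFrom (l : List String) (tok : String) (start : Nat) : Option Int :=
  pvIndexFromAux tok (l.drop start) (start : Int)

theorem pvIndexFromAux_bound (tok : String) (xs : List String) (i j : Int)
    (h : pvIndexFromAux tok xs i = some j) : i ≤ j ∧ j < i + xs.length := by
  induction xs generalizing i with
  | nil => simp [pvIndexFromAux] at h
  | cons t rest ih =>
    simp only [pvIndexFromAux] at h
    split at h
    · cases h; simp only [List.length_cons]; push_cast; omega
    · have := ih (i + 1) h
      simp only [List.length_cons]
      push_cast at this ⊢
      omega

theorem pvIndexFrom_bound (l : List String) (tok : String) (start : Nat) (j : Int)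
    (h : pvIndexFrom l tok start = some j) :
    (start : Int) ≤ j ∧ j.toNat < l.length ∧ start ≤ j.toNat := by
  unfold pvIndexFrom at h
  have hb := pvIndexFromAux_bound tok (l.drop start) (start : Int) j h
  by_cases hs : l.length ≤ start
  · rw [List.drop_eq_nil_of_le hs] at h
    simp [pvIndexFromAux] at h
  · rw [List.length_drop] at hb
    omega

-- the 'while may_be_multiple_occurrences' loop: returns (used_lemma, skip_this_key flag it sets)
def pvWhileA (l : List String) (used : List Int) (tok : String) (prev : Int) (start : Nat) :
    Int × Bool :=
  match h : pvIndexFrom l tok start with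
  | none => (prev, true)          -- ValueError: skip_this_key = True, used_lemma keeps its value
  | some i =>
    if i ∈ used then pvWhileA l used tok i (i.toNat + 1)   -- continue: try again from used_lemma+1
    else (i, false)
termination_by l.length - start
decreasing_by
  have := pvIndexFrom_bound l tok start i h
  omega

-- 'for key_token in key_as_list': appends used_lemma each round, ORs the skip flag
def pvTokensA (l : List String) : List String → List Int → Bool → List Int × Bool
  | [], used, sk => (used, sk)
  | tok :: rest, used, sk =>
    let r := pvWhileA l used tok (-1) 0
    pvTokensA l rest (used ++ [r.1]) (sk || r.2)

-- 'for key_as_list in key_list' (key_list already reversed)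
def pvKeysA (l : List String) : List (List String) → List Int → List String → List String
  | [], _, acc => acc
  | kal :: rest, used, acc =>
    let r := pvTokensA l kal used false
    pvKeysA l rest r.1 (if r.2 then acc else acc ++ [PySem.Str.join " " kal])

def clean_up_crunched_keys (lemma_list : List String) (crunched_keys : List (List (List String))) : List (List String) :=
  let cleaned := crunched_keys.foldl
    (fun acc kl => acc ++ [pvKeysA lemma_list kl.reverse [] []]) []
  cleaned.foldl (fun nd inner => if inner ∈ nd then nd else nd ++ [inner]) []

-- ===== PORT B =====
-- total = {}; for tok in lemma_list: total[tok] = total.get(tok, 0) + 1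
def pvTotalB (lemma_list : List String) : PySem.Dict String Int :=
  lemma_list.foldl (fun d tok => d.insert tok (d.getD tok 0 + 1)) PySem.Dict.empty

-- 'for tok in phrase: n = seen.get(tok,0)+1; seen[tok] = n; if n > total.get(tok,0): keep = False'
def pvTokensB (total : PySem.Dict String Int) :
    List String → PySem.Dict String Int → Bool → PySem.Dict String Int × Bool
  | [], seen, keep => (seen, keep)
  | tok :: rest, seen, keep =>
    let n := seen.getD tok 0 + 1
    pvTokensB total rest (seen.insert tok n) (if n > total.getD tok 0 then false else keep)

def pvKeysB (total : PySem.Dict String Int) :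
    List (List String) → PySem.Dict String Int → List String → List String
  | [], _, acc => acc
  | phrase :: rest, seen, acc =>
    let r := pvTokensB total phrase seen true
    pvKeysB total rest r.1 (if r.2 then acc ++ [PySem.Str.join " " phrase] else acc)

def clean_up_crunched_keys_alt (lemma_list : List String) (crunched_keys : List (List (List String))) : List (List String) :=
  let total := pvTotalB lemma_list
  let cleaned := crunched_keys.foldl
    (fun acc kl => acc ++ [pvKeysB total kl.reverse PySem.Dict.empty []]) []
  (cleaned.foldl
    (fun (st : List (List String) × PySem.Set (List String)) inner =>
      if inner ∈ st.2 then st else (st.1 ++ [inner], PySem.Set.add st.2 inner))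
    ([], PySem.Set.empty)).1

-- ===== PRECONDITION & SPEC =====
def Spec_clean_up_crunched_keys (lemma_list : List String) (crunched_keys : List (List (List String))) (out : List (List String)) : Prop := out = clean_up_crunched_keys_alt lemma_list crunched_keys
instance (lemma_list : List String) (crunched_keys : List (List (List String))) (out : List (List String)) : Decidable (Spec_clean_up_crunched_keys lemma_list crunched_keys out) := by unfold Spec_clean_up_crunched_keys; infer_instance

-- ===== CLAIM (what is proved, stated in full; the proofs are below) =====
def Claim_equal_clean_up_crunched_keys : Prop := ∀ (lemma_list : List String) (crunched_keys : List (List (List String))), Dom_clean_up_crunched_keys lemma_list crunched_keys → Spec_clean_up_crunched_keys lemma_list crunched_keys (clean_up_crunched_keys lemma_list crunched_keys)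

-- ===== LEMMAS AND PROOFS =====

-- ghost view shared by the two ports: the ascending positions ≥ i of tok in xs
def pvPosIdx (tok : String) : List String → Int → List Int
  | [], _ => []
  | t :: rest, i => if t == tok then i :: pvPosIdx tok rest (i + 1) else pvPosIdx tok rest (i + 1)

-- ghost view of A's retry loop: first element of ps not in used
def pvFirstUnused (used : List Int) : List Int → Option Int
  | [] => none
  | p :: rest => if p ∈ used then pvFirstUnused used rest else some p

theorem pvPosIdx_lb (tok : String) (xs : List String) (i : Int) :
    ∀ z ∈ pvPosIdx tok xs i, i ≤ z := by
  induction xs generalizing i with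
  | nil => simp [pvPosIdx]
  | cons t rest ih =>
    intro z hz
    simp only [pvPosIdx] at hz
    split at hz
    · rcases List.mem_cons.mp hz with rfl | hz
      · omega
      · have := ih (i + 1) z hz; omega
    · have := ih (i + 1) z hz; omega

theorem pvPosIdx_sorted (tok : String) (xs : List String) (i : Int) :
    (pvPosIdx tok xs i).Pairwise (· < ·) := by
  induction xs generalizing i with
  | nil => simp [pvPosIdx]
  | cons t rest ih =>
    simp only [pvPosIdx]
    split
    · exact List.pairwise_cons.mpr ⟨fun z hz => by have := pvPosIdx_lb tok rest (i + 1) z hz; omega, ih (i + 1)⟩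
    · exact ih (i + 1)

theorem pvPosIdx_disjoint (xs : List String) (i : Int) (t t' : String) (z : Int)
    (h1 : z ∈ pvPosIdx t xs i) (h2 : z ∈ pvPosIdx t' xs i) : t = t' := by
  induction xs generalizing i with
  | nil => simp [pvPosIdx] at h1
  | cons x rest ih =>
    simp only [pvPosIdx] at h1 h2
    by_cases hxt : (x == t) = true
    · rw [if_pos hxt] at h1
      by_cases hxt' : (x == t') = true
      · exact (beq_iff_eq.mp hxt).symm.trans (beq_iff_eq.mp hxt')
      · rw [if_neg hxt'] at h2
        rcases List.mem_cons.mp h1 with rfl | h1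
        · have := pvPosIdx_lb t' rest (z + 1) z h2; omega
        · exact ih (i + 1) h1 h2
    · rw [if_neg hxt] at h1
      by_cases hxt' : (x == t') = true
      · rw [if_pos hxt'] at h2
        rcases List.mem_cons.mp h2 with rfl | h2
        · have := pvPosIdx_lb t rest (z + 1) z h1; omega
        · exact ih (i + 1) h1 h2
      · rw [if_neg hxt'] at h2
        exact ih (i + 1) h1 h2

theorem pvPosIdx_length (tok : String) (xs : List String) (i : Int) :
    (pvPosIdx tok xs i).length = xs.count tok := by
  induction xs generalizing i with
  | nil => simp [pvPosIdx]
  | cons t rest ih =>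
    simp only [pvPosIdx, List.count_cons]
    by_cases ht : (t == tok) = true
    · rw [if_pos ht, List.length_cons, ih (i + 1), if_pos ht]
    · rw [if_neg ht, ih (i + 1), if_neg ht, Nat.add_zero]

theorem pvPosIdx_split (tok : String) (xs : List String) (i : Int) :
    pvPosIdx tok xs i = (match pvIndexFromAux tok xs i with
      | none => []
      | some j => j :: pvPosIdx tok (xs.drop (j + 1 - i).toNat) (j + 1)) := by
  induction xs generalizing i with
  | nil => simp [pvPosIdx, pvIndexFromAux]
  | cons t rest ih =>
    by_cases ht : (t == tok) = true
    · simp only [pvPosIdx, pvIndexFromAux, if_pos ht]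
      have h1 : (i + 1 - i).toNat = 1 := by omega
      rw [h1, List.drop_succ_cons, List.drop_zero]
    · simp only [pvPosIdx, pvIndexFromAux, if_neg ht]
      rw [ih (i + 1)]
      cases hfind : pvIndexFromAux tok rest (i + 1) with
      | none => rfl
      | some j =>
        have hb := pvIndexFromAux_bound tok rest (i + 1) j hfind
        have h1 : (j + 1 - i).toNat = (j + 1 - (i + 1)).toNat + 1 := by omega
        show j :: pvPosIdx tok (rest.drop (j + 1 - (i + 1)).toNat) (j + 1)
          = j :: pvPosIdx tok ((t :: rest).drop (j + 1 - i).toNat) (j + 1)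
        rw [h1, List.drop_succ_cons]

-- A's retry-from-index while loop = first-unused scan of the ghost position list
theorem pvWhile_eq_firstUnused (l : List String) (tok : String) :
    ∀ (start : Nat), start ≤ l.length →
    ∀ (used : List Int) (prev : Int), (prev = -1 ∨ prev ∈ used) →
      (match pvFirstUnused used (pvPosIdx tok (l.drop start) start) with
        | some p => pvWhileA l used tok prev start = (p, false)
        | none => (pvWhileA l used tok prev start).2 = true ∧
            ((pvWhileA l used tok prev start).1 = -1 ∨ (pvWhileA l used tok prev start).1 ∈ used)) := by
  intro start hstart used prev hprev
  rw [pvPosIdx_split]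
  unfold pvWhileA
  cases h : pvIndexFrom l tok start with
  | none =>
    unfold pvIndexFrom at h
    simp only [h, pvFirstUnused]
    exact ⟨by trivial, by simpa using hprev⟩
  | some j =>
    have hb := pvIndexFrom_bound l tok start j h
    unfold pvIndexFrom at h
    simp only [h]
    have hdd : (l.drop start).drop (j + 1 - (start : Int)).toNat = l.drop (j.toNat + 1) := by
      rw [List.drop_drop]
      congr 1
      omega
    have hj1 : j + 1 = ((j.toNat + 1 : Nat) : Int) := by omega
    rw [hdd, hj1]
    simp only [pvFirstUnused]
    by_cases hmem : j ∈ used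
    · rw [if_pos hmem, if_pos hmem]
      exact pvWhile_eq_firstUnused l tok (j.toNat + 1) (by omega) used j (Or.inr hmem)
    · rw [if_neg hmem, if_neg hmem]
termination_by start => l.length - start
decreasing_by omega

-- coupling invariant: the used-positions list of A holds, among the positions of each token t,
-- exactly the first (seen t) of them (extra junk in usedA — -1 and stale duplicates — is never a position)
def pvInv (l : List String) (usedA : List Int) (seen : PySem.Dict String Int) : Prop :=
  (∀ t, 0 ≤ seen.getD t 0) ∧
  ∀ t z, z ∈ pvPosIdx t l 0 →
    (z ∈ usedA ↔ z ∈ (pvPosIdx t l 0).take (seen.getD t 0).toNat)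

theorem pvFirstUnused_of_take (used : List Int) (ps : List Int) (c : Nat)
    (hs : ps.Pairwise (· < ·))
    (h : ∀ z ∈ ps, (z ∈ used ↔ z ∈ ps.take c)) :
    pvFirstUnused used ps = ps[c]? := by
  induction ps generalizing c with
  | nil => simp [pvFirstUnused]
  | cons p rest ih =>
    obtain ⟨hp, hrest⟩ := List.pairwise_cons.mp hs
    cases c with
    | zero =>
      have : p ∉ used := fun hc => by simpa using (h p (List.mem_cons_self ..)).mp hc
      simp [pvFirstUnused, this]
    | succ k =>
      have hpu : p ∈ used := (h p (List.mem_cons_self ..)).mpr (by simp [List.take_succ_cons])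
      simp only [pvFirstUnused, if_pos hpu, List.getElem?_cons_succ]
      refine ih k hrest (fun z hz => ?_)
      have hne : z ≠ p := fun hzp => by have := hp z hz; omega
      rw [h z (List.mem_cons_of_mem _ hz), List.take_succ_cons, List.mem_cons]
      exact ⟨fun hc => hc.resolve_left hne, Or.inr⟩

theorem pvTotalB_getD (l : List String) (tok : String) :
    (pvTotalB l).getD tok 0 = (l.count tok : Int) := by
  unfold pvTotalB
  rw [PySem.Dict.getD_foldl_insert_add_one]
  simp [PySem.Dict.getD_empty]

-- one token: A's while loop + append vs B's counter bump, preserving the invariant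
theorem pvToken_step (l : List String) (usedA : List Int) (seen : PySem.Dict String Int)
    (tok : String) (hInv : pvInv l usedA seen) :
    pvInv l (usedA ++ [(pvWhileA l usedA tok (-1) 0).1]) (seen.insert tok (seen.getD tok 0 + 1)) ∧
    (pvWhileA l usedA tok (-1) 0).2 = decide (seen.getD tok 0 + 1 > (l.count tok : Int)) := by
  obtain ⟨hnn, hmem⟩ := hInv
  set c := (seen.getD tok 0).toNat with hc
  have hc' : seen.getD tok 0 = (c : Int) := by have := hnn tok; omega
  have hkey := pvWhile_eq_firstUnused l tok 0 (Nat.zero_le _) usedA (-1) (Or.inl rfl)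
  simp only [Nat.cast_zero, List.drop_zero] at hkey
  have hfu : pvFirstUnused usedA (pvPosIdx tok l 0) = (pvPosIdx tok l 0)[c]? :=
    pvFirstUnused_of_take usedA _ c (pvPosIdx_sorted tok l 0) (hmem tok)
  rw [hfu] at hkey
  have hnn' : ∀ t, 0 ≤ (seen.insert tok (seen.getD tok 0 + 1)).getD t 0 := by
    intro t
    rw [PySem.Dict.getD_insert]
    split
    · have := hnn tok; omega
    · exact hnn t
  by_cases hlt : c < (pvPosIdx tok l 0).length
  · -- success: the (c+1)-th occurrence is consumed
    have hget : (pvPosIdx tok l 0)[c]? = some (pvPosIdx tok l 0)[c] := List.getElem?_eq_getElem hlt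
    rw [hget] at hkey
    set p := (pvPosIdx tok l 0)[c] with hp
    constructor
    · refine ⟨hnn', fun t z hz => ?_⟩
      rw [hkey]
      simp only [List.mem_append, List.mem_singleton, PySem.Dict.getD_insert]
      by_cases ht : t = tok
      · subst ht
        rw [if_pos rfl]
        have htake : (pvPosIdx t l 0).take ((seen.getD t 0 + 1).toNat)
            = (pvPosIdx t l 0).take c ++ [p] := by
          rw [hc', show ((c : Int) + 1).toNat = c + 1 by omega]
          exact (List.take_succ_eq_append_getElem hlt)
        rw [htake, List.mem_append, List.mem_singleton, hmem t z hz]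
      · rw [if_neg ht]
        have hzp : z ≠ p := fun hzp =>
          ht (pvPosIdx_disjoint l 0 t tok z hz (hzp ▸ List.getElem_mem hlt))
        constructor
        · rintro (h | h2)
          · exact (hmem t z hz).mp h
          · exact absurd h2 hzp
        · intro h; exact Or.inl ((hmem t z hz).mpr h)
    · have hcount := pvPosIdx_length tok l 0
      rw [hcount] at hlt
      rw [hkey, hc']
      have hng : ¬ ((c : Int) + 1 > (l.count tok : Int)) := by omega
      simp [hng]
  · -- exhausted: skip, stale append, counter over-bumps harmlessly
    have hget : (pvPosIdx tok l 0)[c]? = none := List.getElem?_eq_none (by omega)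
    rw [hget] at hkey
    obtain ⟨hsk, hstale⟩ := hkey
    constructor
    · refine ⟨hnn', fun t z hz => ?_⟩
      have hz0 := pvPosIdx_lb t l 0 z hz
      have hznotq : z ∈ usedA ++ [(pvWhileA l usedA tok (-1) 0).1] ↔ z ∈ usedA := by
        rw [List.mem_append, List.mem_singleton]
        constructor
        · rintro (h | rfl)
          · exact h
          · rcases hstale with hq | hq
            · omega
            · exact hq
        · exact Or.inl
      rw [hznotq, hmem t z hz, PySem.Dict.getD_insert]
      by_cases ht : t = tok
      · subst ht
        rw [if_pos rfl, hc']
        have e1 : ((c : Int)).toNat = c := by omega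
        have e2 : ((c : Int) + 1).toNat = c + 1 := by omega
        rw [e1, e2, List.take_of_length_le (by omega), List.take_of_length_le (by omega)]
      · rw [if_neg ht]
    · have hcount := pvPosIdx_length tok l 0
      rw [hcount] at hlt
      rw [hsk, hc']
      have hg : (c : Int) + 1 > (l.count tok : Int) := by omega
      simp [hg]

theorem pvTokens_eq (l : List String) (toks : List String) :
    ∀ (usedA : List Int) (seen : PySem.Dict String Int) (sk keep : Bool),
      pvInv l usedA seen → sk = !keep →
      pvInv l (pvTokensA l toks usedA sk).1 (pvTokensB (pvTotalB l) toks seen keep).1 ∧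
      (pvTokensA l toks usedA sk).2 = !(pvTokensB (pvTotalB l) toks seen keep).2 := by
  induction toks with
  | nil => intro usedA seen sk keep hInv hsk; exact ⟨hInv, by simp [pvTokensA, pvTokensB, hsk]⟩
  | cons tok rest ih =>
    intro usedA seen sk keep hInv hsk
    obtain ⟨hInv', hflag⟩ := pvToken_step l usedA seen tok hInv
    simp only [pvTokensA, pvTokensB, pvTotalB_getD]
    refine ih _ _ _ _ hInv' ?_
    rw [hsk, hflag]
    by_cases h : seen.getD tok 0 + 1 > (l.count tok : Int) <;> simp [h]

theorem pvKeys_eq (l : List String) (kls : List (List String)) :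
    ∀ (usedA : List Int) (seen : PySem.Dict String Int) (acc : List String),
      pvInv l usedA seen →
      pvKeysA l kls usedA acc = pvKeysB (pvTotalB l) kls seen acc := by
  induction kls with
  | nil => intro _ _ _ _; rfl
  | cons kal rest ih =>
    intro usedA seen acc hInv
    simp only [pvKeysA, pvKeysB]
    obtain ⟨hInv', hsk⟩ := pvTokens_eq l kal usedA seen false true hInv (by simp)
    rw [hsk]
    cases h : (pvTokensB (pvTotalB l) kal seen true).2 <;> simp only [Bool.not_false, Bool.not_true,
      if_true] <;> exact ih _ _ _ hInv'

theorem pvInv_empty (l : List String) : pvInv l [] PySem.Dict.empty := by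
  refine ⟨fun t => by simp [PySem.Dict.getD_empty], fun t z hz => ?_⟩
  simp [PySem.Dict.getD_empty]

theorem pvCleaned_eq (l : List String) (ck : List (List (List String)))
    (acc : List (List String)) :
    ck.foldl (fun acc kl => acc ++ [pvKeysA l kl.reverse [] []]) acc
      = ck.foldl (fun acc kl => acc ++ [pvKeysB (pvTotalB l) kl.reverse PySem.Dict.empty []]) acc := by
  induction ck generalizing acc with
  | nil => rfl
  | cons kl rest ih =>
    simp only [List.foldl_cons]
    rw [pvKeys_eq l kl.reverse [] PySem.Dict.empty [] (pvInv_empty l)]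
    exact ih _

theorem pvDedup_eq (ls : List (List String)) :
    ∀ (nd : List (List String)) (st : List (List String) × PySem.Set (List String)),
      nd = st.1 → (∀ x, x ∈ st.2 ↔ x ∈ nd) →
      ls.foldl (fun nd inner => if inner ∈ nd then nd else nd ++ [inner]) nd
        = (ls.foldl (fun st inner =>
            if inner ∈ st.2 then st else (st.1 ++ [inner], PySem.Set.add st.2 inner)) st).1 := by
  induction ls with
  | nil => intro nd st h _; simpa using h
  | cons x rest ih =>
    intro nd st hnd hinv
    simp only [List.foldl_cons]
    by_cases hx : x ∈ st.2
    · rw [if_pos hx, if_pos ((hinv x).mp hx)]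
      exact ih nd st hnd hinv
    · rw [if_neg hx, if_neg (fun hc => hx ((hinv x).mpr hc))]
      refine ih (nd ++ [x]) (st.1 ++ [x], PySem.Set.add st.2 x) (by rw [hnd]) ?_
      intro y
      simp only [PySem.Set.mem_add, List.mem_append, List.mem_singleton, hinv y]

-- ===== VERDICT (by name: the statement is the Claim_ definition above) =====
theorem clean_up_crunched_keys_spec : Claim_equal_clean_up_crunched_keys := by
  intro lemma_list crunched_keys _
  unfold Spec_clean_up_crunched_keys
  simp only [clean_up_crunched_keys, clean_up_crunched_keys_alt]
  rw [pvCleaned_eq]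
  exact pvDedup_eq _ [] ([], PySem.Set.empty) rfl (fun x => Iff.rfl)
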